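-- pv_equiv track=rewrite | github.com/lxr2010/sky-fc-script-aligner | anchors.py | find_stable_anchors
-- ===== SOURCE A (Python) =====
-- def find_stable_anchors(raw_matches:dict[int, list[int]], window_size=2):
--     stable_anchors = {}
--
--     for pos_a, b_candidates in raw_matches.items():
--         if len(b_candidates) == 1:
--             # 唯一匹配，暂时信任
--             stable_anchors[pos_a] = b_candidates[0]
--             continue
--
--         # 存在多个 100% 匹配，寻找“有邻居支持”的那一个
--         best_b = None
--         max_neighbors = 0
--
--         for cand_b in b_candidates:
--             neighbor_count = 0
--             # 检查 A 的前后邻居，看它们的匹配项是否也在 cand_b 的前后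
--             for offset in range(-window_size, window_size + 1):
--                 if offset == 0: continue
--                 neighbor_a = pos_a + offset
--                 if neighbor_a in raw_matches:
--                     # 如果邻居的匹配项中，有一个正好落在 cand_b 的附近
--                     if any(nb == cand_b for nb in raw_matches[neighbor_a]):
--                         neighbor_count += 1
--
--             if neighbor_count > max_neighbors:
--                 max_neighbors = neighbor_count
--                 best_b = cand_b
--
--         if best_b is not None and max_neighbors > 0:
--             stable_anchors[pos_a] = best_b
--
--     b_to_a_map = {}
--     for pos_a, pos_b in stable_anchors.items():
--         b_to_a_map.setdefault(pos_b, [])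
--         b_to_a_map[pos_b].append(pos_a)
--
--     stable_anchors = {k:v for k,v in stable_anchors.items() if len(b_to_a_map[v]) == 1}
--
--     return stable_anchors
-- ===== SOURCE B (Python) =====
-- def find_stable_anchors(raw_matches: dict[int, list[int]], window_size=2):
--     stable = {}
--     for pos_a, b_candidates in raw_matches.items():
--         if len(b_candidates) == 1:
--             # unique match: trust it for now
--             stable[pos_a] = b_candidates[0]
--             continue
--         if not b_candidates:
--             continue  # nothing to choose from
--         # Invert A's loops: one pass over the window neighbors builds a vote
--         # table (each neighbor votes once per distinct candidate it contains),
--         # then one scan of b_candidates picks the first strict maximum.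
--         votes = {}
--         for offset in range(-window_size, window_size + 1):
--             if offset == 0:
--                 continue
--             neighbor = raw_matches.get(pos_a + offset)
--             if neighbor is None:
--                 continue
--             for b in dict.fromkeys(neighbor):
--                 votes[b] = votes.get(b, 0) + 1
--         best_b = None
--         best_votes = 0
--         for cand in b_candidates:
--             v = votes.get(cand, 0)
--             if v > best_votes:
--                 best_votes = v
--                 best_b = cand
--         if best_b is not None:
--             stable[pos_a] = best_b
--     # keep only anchors whose b-value is used exactly once
--     value_count = {}
--     for b in stable.values():
--         value_count[b] = value_count.get(b, 0) + 1
--     return {a: b for a, b in stable.items() if value_count[b] == 1}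
-- ===== Notes on version B (the rewrite author's own statement) =====
-- stated objective: alternative
-- what changed: A's per-candidate rescans of the window neighbors are replaced by one vote table built in a single pass over the window neighbors (each neighbor votes once per distinct candidate it contains) followed by one scan of b_candidates for the first strict maximum; the reverse-map uniqueness filter is replaced by a counter over the chosen b-values.
import Mathlib
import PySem

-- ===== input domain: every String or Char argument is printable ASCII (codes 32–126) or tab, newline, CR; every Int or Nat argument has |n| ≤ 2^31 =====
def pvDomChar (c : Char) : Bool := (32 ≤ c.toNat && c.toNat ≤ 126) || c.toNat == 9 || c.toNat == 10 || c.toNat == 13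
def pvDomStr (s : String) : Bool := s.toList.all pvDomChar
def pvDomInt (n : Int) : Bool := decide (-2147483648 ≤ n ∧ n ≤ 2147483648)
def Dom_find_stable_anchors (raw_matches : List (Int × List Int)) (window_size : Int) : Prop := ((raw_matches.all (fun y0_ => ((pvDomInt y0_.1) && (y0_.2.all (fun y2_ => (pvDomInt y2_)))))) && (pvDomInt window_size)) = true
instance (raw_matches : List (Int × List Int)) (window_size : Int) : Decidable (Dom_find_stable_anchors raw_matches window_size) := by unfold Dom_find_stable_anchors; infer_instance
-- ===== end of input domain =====

-- B replaces A's per-candidate window rescans by one vote table built in a single pass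
-- over the window neighbors, and the reverse-map filter by a value counter (alternative
-- decomposition, same return value).

-- ===== PORT A =====
-- inner 'for offset in range(...)' loop of A, counting neighbors supporting cand_b
def pvNeighborCount (d : PySem.Dict Int (List Int)) (pos_a cand_b window_size : Int) : Int :=
  (PySem.List.pyRange (-window_size) (window_size + 1) 1).foldl
    (fun cnt offset =>
      if offset == 0 then cnt
      else
        if d.contains (pos_a + offset) then
          if (d.getD (pos_a + offset) []).any (fun nb => nb == cand_b) then cnt + 1 else cnt
        else cnt) 0

-- A's 'for cand_b in b_candidates' selection loop; state = (best_b, max_neighbors)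
def pvBestA (d : PySem.Dict Int (List Int)) (pos_a : Int) (b_candidates : List Int)
    (window_size : Int) : Option Int × Int :=
  b_candidates.foldl
    (fun st cand_b =>
      if pvNeighborCount d pos_a cand_b window_size > st.2 then
        (some cand_b, pvNeighborCount d pos_a cand_b window_size)
      else st)
    (none, 0)

def find_stable_anchors (raw_matches : List (Int × List Int)) (window_size : Int) : List (Int × Int) :=
  let d := PySem.Dict.ofList raw_matches
  -- stable_anchors: keys come from d.items (unique), so each insertion appends
  let stable := d.items.foldl
    (fun acc p =>
      if p.2.length == 1 then acc ++ [(p.1, p.2.headD 0)]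
      else
        let st := pvBestA d p.1 p.2 window_size
        if st.1.isSome && st.2 > 0 then acc ++ [(p.1, st.1.getD 0)] else acc) []
  let b_to_a : PySem.Dict Int (List Int) :=
    stable.foldl (fun m p => m.modify p.2 [] (fun l => l ++ [p.1])) PySem.Dict.empty
  stable.filter (fun p => (b_to_a.getD p.2 []).length == 1)

-- ===== PORT B =====
-- B's vote table: one pass over the window neighbors, +1 per distinct candidate of each
def pvVotes (d : PySem.Dict Int (List Int)) (pos_a window_size : Int) : PySem.Dict Int Int :=
  (PySem.List.pyRange (-window_size) (window_size + 1) 1).foldl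
    (fun vd offset =>
      if offset == 0 then vd
      else
        match d.get? (pos_a + offset) with
        | none => vd
        | some neighbor =>
            (PySem.List.dedup neighbor).foldl
              (fun vd b => vd.insert b (vd.getD b 0 + 1)) vd)
    PySem.Dict.empty

-- B's selection scan over b_candidates using the vote table
def pvBestB (votes : PySem.Dict Int Int) (b_candidates : List Int) : Option Int × Int :=
  b_candidates.foldl
    (fun st cand =>
      if votes.getD cand 0 > st.2 then (some cand, votes.getD cand 0) else st)
    (none, 0)

def find_stable_anchors_alt (raw_matches : List (Int × List Int)) (window_size : Int) : List (Int × Int) :=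
  let d := PySem.Dict.ofList raw_matches
  let stable := d.items.foldl
    (fun acc p =>
      if p.2.length == 1 then acc ++ [(p.1, p.2.headD 0)]
      else if p.2.isEmpty then acc
      else
        match (pvBestB (pvVotes d p.1 window_size) p.2).1 with
        | some b => acc ++ [(p.1, b)]
        | none => acc) []
  let vc := PySem.Dict.counter (stable.map (fun p => p.2))
  stable.filter (fun p => vc.getD p.2 0 == 1)

-- ===== PRECONDITION & SPEC =====
def Spec_find_stable_anchors (raw_matches : List (Int × List Int)) (window_size : Int) (out : List (Int × Int)) : Prop := out = find_stable_anchors_alt raw_matches window_size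
instance (raw_matches : List (Int × List Int)) (window_size : Int) (out : List (Int × Int)) : Decidable (Spec_find_stable_anchors raw_matches window_size out) := by unfold Spec_find_stable_anchors; infer_instance

-- ===== CLAIM (what is proved, stated in full; the proofs are below) =====
def Claim_equal_find_stable_anchors : Prop := ∀ (raw_matches : List (Int × List Int)) (window_size : Int), Dom_find_stable_anchors raw_matches window_size → Spec_find_stable_anchors raw_matches window_size (find_stable_anchors raw_matches window_size)

-- ===== LEMMAS AND PROOFS =====

-- per-offset contribution to cand c's support, shared characterisation of both loops
def pvContrib (d : PySem.Dict Int (List Int)) (pos_a c offset : Int) : Int :=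
  if offset = 0 then 0
  else
    match d.get? (pos_a + offset) with
    | none => 0
    | some nbs => if c ∈ nbs then 1 else 0

theorem pvCount_dedup (nbs : List Int) (c : Int) :
    ((PySem.List.dedup nbs).count c : Int) = if c ∈ nbs then 1 else 0 := by
  by_cases h : c ∈ nbs
  · simp only [h, if_true]
    have h1 : 1 ≤ (PySem.List.dedup nbs).count c :=
      List.count_pos_iff.mpr ((PySem.List.mem_dedup _ _).mpr h)
    have h2 : (PySem.List.dedup nbs).count c ≤ 1 :=
      List.nodup_iff_count_le_one.mp (PySem.List.nodup_dedup nbs) c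
    omega
  · simp only [h, if_false]
    have : (PySem.List.dedup nbs).count c = 0 :=
      List.count_eq_zero_of_not_mem (fun hm => h ((PySem.List.mem_dedup _ _).mp hm))
    omega

theorem pvCountA_eq (d : PySem.Dict Int (List Int)) (pos_a c : Int) (offs : List Int) (n : Int) :
    offs.foldl
      (fun cnt offset =>
        if offset == 0 then cnt
        else
          if d.contains (pos_a + offset) then
            if (d.getD (pos_a + offset) []).any (fun nb => nb == c) then cnt + 1 else cnt
          else cnt) n
    = n + (offs.map (pvContrib d pos_a c)).sum := by
  induction offs generalizing n with
  | nil => simp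
  | cons o rest ih =>
    simp only [List.foldl_cons, List.map_cons, List.sum_cons, ih]
    have hstep :
        (if o == 0 then n
         else
           if d.contains (pos_a + o) then
             if (d.getD (pos_a + o) []).any (fun nb => nb == c) then n + 1 else n
           else n) = n + pvContrib d pos_a c o := by
      unfold pvContrib
      by_cases h0 : o = 0
      · simp [h0]
      · simp only [h0, if_false, beq_iff_eq]
        cases hg : d.get? (pos_a + o) with
        | none =>
          have hc : d.contains (pos_a + o) = false := by
            simp [PySem.Dict.contains_eq_isSome_get?, hg]
          simp [hc, h0]
        | some nbs =>
          have hc : d.contains (pos_a + o) = true := by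
            simp [PySem.Dict.contains_eq_isSome_get?, hg]
          have hgd : d.getD (pos_a + o) [] = nbs := by
            simp [PySem.Dict.getD_eq_get?_getD, hg]
          have hany : (nbs.any (fun nb => nb == c)) = decide (c ∈ nbs) := by
            rw [List.any_beq', List.contains_eq_mem]
          rw [hgd]
          by_cases hm : c ∈ nbs <;> simp [h0, hc, hany, hm]
    rw [hstep]
    omega

theorem pvVotes_getD_eq (d : PySem.Dict Int (List Int)) (pos_a c : Int) (offs : List Int)
    (vd : PySem.Dict Int Int) :
    (offs.foldl
      (fun vd offset =>
        if offset == 0 then vd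
        else
          match d.get? (pos_a + offset) with
          | none => vd
          | some neighbor =>
              (PySem.List.dedup neighbor).foldl
                (fun vd b => vd.insert b (vd.getD b 0 + 1)) vd) vd).getD c 0
    = vd.getD c 0 + (offs.map (pvContrib d pos_a c)).sum := by
  induction offs generalizing vd with
  | nil => simp
  | cons o rest ih =>
    simp only [List.foldl_cons, List.map_cons, List.sum_cons, ih]
    have hstep :
        ((if o == 0 then vd
          else
            match d.get? (pos_a + o) with
            | none => vd
            | some neighbor =>
                (PySem.List.dedup neighbor).foldl
                  (fun vd b => vd.insert b (vd.getD b 0 + 1)) vd) : PySem.Dict Int Int).getD c 0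
        = vd.getD c 0 + pvContrib d pos_a c o := by
      unfold pvContrib
      by_cases h0 : o = 0
      · simp [h0]
      · simp only [h0, if_false, beq_iff_eq]
        cases hg : d.get? (pos_a + o) with
        | none => simp [h0]
        | some nbs =>
          simp only [h0, if_false]
          rw [PySem.Dict.getD_foldl_insert_add_one, pvCount_dedup]
    rw [hstep]
    omega

theorem pvCount_votes (d : PySem.Dict Int (List Int)) (pos_a window_size c : Int) :
    pvNeighborCount d pos_a c window_size = (pvVotes d pos_a window_size).getD c 0 := by
  unfold pvNeighborCount pvVotes
  rw [pvCountA_eq, pvVotes_getD_eq]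
  simp [PySem.Dict.getD_empty]

theorem pvBest_eq (d : PySem.Dict Int (List Int)) (pos_a window_size : Int) (bc : List Int) :
    pvBestA d pos_a bc window_size = pvBestB (pvVotes d pos_a window_size) bc := by
  unfold pvBestA pvBestB
  congr 1
  funext st cand
  rw [pvCount_votes]

-- the selection fold's state: best is some iff the running max is positive
theorem pvBestB_inv (votes : PySem.Dict Int Int) (bc : List Int) (st : Option Int × Int)
    (h : 0 ≤ st.2 ∧ (st.1.isSome = true ↔ 0 < st.2)) :
    0 ≤ (bc.foldl
      (fun st cand =>
        if votes.getD cand 0 > st.2 then (some cand, votes.getD cand 0) else st) st).2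
    ∧ ((bc.foldl
      (fun st cand =>
        if votes.getD cand 0 > st.2 then (some cand, votes.getD cand 0) else st) st).1.isSome = true
     ↔ 0 < (bc.foldl
      (fun st cand =>
        if votes.getD cand 0 > st.2 then (some cand, votes.getD cand 0) else st) st).2) := by
  induction bc generalizing st with
  | nil => exact h
  | cons x rest ih =>
    obtain ⟨h1, h2⟩ := h
    simp only [List.foldl_cons]
    apply ih
    by_cases hx : votes.getD x 0 > st.2
    · simp only [hx, if_true]
      constructor
      · omega
      · constructor
        · intro _; omega
        · intro _; rfl
    · simp only [hx, if_false]; exact ⟨h1, h2⟩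

theorem pvBestB_some_iff (votes : PySem.Dict Int Int) (bc : List Int) :
    ((pvBestB votes bc).1.isSome = true ↔ 0 < (pvBestB votes bc).2) := by
  unfold pvBestB
  exact (pvBestB_inv votes bc (none, 0) ⟨le_refl 0, by simp⟩).2

theorem pvStable_eq (d : PySem.Dict Int (List Int)) (window_size : Int)
    (items : List (Int × List Int)) (acc : List (Int × Int)) :
    items.foldl
      (fun acc p =>
        if p.2.length == 1 then acc ++ [(p.1, p.2.headD 0)]
        else
          let st := pvBestA d p.1 p.2 window_size
          if st.1.isSome && st.2 > 0 then acc ++ [(p.1, st.1.getD 0)] else acc) acc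
    = items.foldl
      (fun acc p =>
        if p.2.length == 1 then acc ++ [(p.1, p.2.headD 0)]
        else if p.2.isEmpty then acc
        else
          match (pvBestB (pvVotes d p.1 window_size) p.2).1 with
          | some b => acc ++ [(p.1, b)]
          | none => acc) acc := by
  induction items generalizing acc with
  | nil => rfl
  | cons p rest ih =>
    simp only [List.foldl_cons]
    rw [← ih]
    congr 1
    by_cases hl : p.2.length == 1
    · simp [hl]
    · simp only [hl, if_false]
      by_cases he : p.2.isEmpty
      · have hnil : p.2 = [] := List.isEmpty_iff.mp he
        simp [he, hnil, pvBestA]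
      · simp only [he, Bool.false_eq_true, if_false]
        rw [pvBest_eq]
        have hiff := pvBestB_some_iff (pvVotes d p.1 window_size) p.2
        cases hs : (pvBestB (pvVotes d p.1 window_size) p.2).1 with
        | none =>
          have : ¬ 0 < (pvBestB (pvVotes d p.1 window_size) p.2).2 := by
            intro hp
            have := hiff.mpr hp
            rw [hs] at this; simp at this
          simp only [hs]
          simp [this]
        | some b =>
          have hpos : 0 < (pvBestB (pvVotes d p.1 window_size) p.2).2 :=
            hiff.mp (by rw [hs]; rfl)
          simp only [hs]
          simp [hpos]

-- A's reverse-map list length at v = count of v among stable's b-values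
theorem pvRevMap_len (stable : List (Int × Int)) (v : Int) :
    ((stable.foldl (fun m p => m.modify p.2 [] (fun l => l ++ [p.1]))
        (PySem.Dict.empty : PySem.Dict Int (List Int))).getD v []).length
    = (stable.map (fun p => p.2)).count v := by
  have hswap : stable.foldl (fun m p => m.modify p.2 [] (fun l => l ++ [p.1]))
        (PySem.Dict.empty : PySem.Dict Int (List Int))
      = (stable.map (fun p => (p.2, p.1))).foldl
          (fun m q => m.modify q.1 [] (fun l => l ++ [q.2])) PySem.Dict.empty := by
    rw [List.foldl_map]
  rw [hswap, PySem.Dict.getD_foldl_modify_append]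
  simp only [PySem.Dict.getD_empty, List.nil_append, List.length_map]
  rw [← List.countP_eq_length_filter, List.count_eq_countP, List.countP_map,
    List.countP_map]
  apply List.countP_congr
  intro a _
  rfl

theorem find_stable_anchors_eq (raw_matches : List (Int × List Int)) (window_size : Int) :
    find_stable_anchors raw_matches window_size = find_stable_anchors_alt raw_matches window_size := by
  unfold find_stable_anchors find_stable_anchors_alt
  dsimp only
  rw [pvStable_eq]
  apply List.filter_congr
  intro p _
  rw [pvRevMap_len, PySem.Dict.getD_counter]
  apply Bool.eq_iff_iff.mpr
  simp only [beq_iff_eq]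
  omega

-- ===== VERDICT (by name: the statement is the Claim_ definition above) =====
theorem find_stable_anchors_spec : Claim_equal_find_stable_anchors := by
  intro raw_matches window_size _
  unfold Spec_find_stable_anchors
  exact find_stable_anchors_eq raw_matches window_size
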